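-- pv_equiv track=rewrite | github.com/tcozzib/TPgrupal-NicolasAristidesTomas | biblioteca.py | columnasConsecutivasAscendentes
-- ===== SOURCE A (Python) =====
-- Posición = tuple[str,int]            # una ubicación de una grilla, dada por una letra y un número
--
-- def númeroDePosición(posición: Posición) -> int:
--     """ Describe el número de la posición *posición*. """
--     return posición[1]
--
-- def columnasConsecutivasAscendentes(posiciones: list[Posición]) -> bool:
--     """ Indica si las columnas de las posiciones en *posiciones* son consecutivas de forma ascendente.
--         PRE: sonPosicionesVálidas(posiciones)
--     """
--     if len(posiciones) == 0:
--         return True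
--     columnaActual = númeroDePosición(posiciones[0])
--     posiciónActual = 1
--     while posiciónActual < len(posiciones) and númeroDePosición(posiciones[posiciónActual]) == columnaActual + 1:
--         posiciónActual += 1
--         columnaActual += 1
--     return posiciónActual == len(posiciones)
-- ===== SOURCE B (Python) =====
-- def columnasConsecutivasAscendentes(posiciones):
--     cols = [p[1] for p in posiciones]
--     if not cols:
--         return True
--     return cols == list(range(cols[0], cols[0] + len(cols)))
-- ===== Notes on version B (the rewrite author's own statement) =====
-- stated objective: simpler
-- what changed: Replaces A's early-exit while loop with index/counter state by building the expected arithmetic progression range(cols[0], cols[0]+len(cols)) and comparing the whole column list against it.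
import Mathlib
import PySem

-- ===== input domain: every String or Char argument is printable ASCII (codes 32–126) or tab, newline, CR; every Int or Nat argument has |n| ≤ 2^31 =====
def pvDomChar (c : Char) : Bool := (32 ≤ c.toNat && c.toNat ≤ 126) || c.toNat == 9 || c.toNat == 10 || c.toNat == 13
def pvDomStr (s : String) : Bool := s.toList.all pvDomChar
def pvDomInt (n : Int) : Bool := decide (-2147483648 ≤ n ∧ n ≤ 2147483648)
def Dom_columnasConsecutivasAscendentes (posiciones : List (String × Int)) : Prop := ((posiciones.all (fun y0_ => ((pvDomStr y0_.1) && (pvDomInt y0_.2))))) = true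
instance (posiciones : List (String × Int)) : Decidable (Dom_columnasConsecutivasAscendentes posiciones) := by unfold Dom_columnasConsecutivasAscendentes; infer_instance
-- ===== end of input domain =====

-- B replaces A's early-exit while loop by comparing the column list with the explicitly built
-- consecutive progression; objective: simpler.


-- ===== PORT A =====
-- número de posición: posición[1]
def numeroDePosicion (posicion : String × Int) : Int := posicion.2

-- the while loop: advances posiciónActual/columnaActual while the next column is columnaActual+1
def ccaLoop (posiciones : List (String × Int)) (posicionActual : Nat) (columnaActual : Int) : Nat :=
  if h : posicionActual < posiciones.length ∧
      numeroDePosicion (posiciones.getD posicionActual ("", 0)) = columnaActual + 1 then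
    ccaLoop posiciones (posicionActual + 1) (columnaActual + 1)
  else
    posicionActual
termination_by posiciones.length - posicionActual
decreasing_by omega

def columnasConsecutivasAscendentes (posiciones : List (String × Int)) : Bool :=
  if posiciones.length = 0 then true
  else
    let columnaActual := numeroDePosicion (posiciones.getD 0 ("", 0))
    decide (ccaLoop posiciones 1 columnaActual = posiciones.length)

-- ===== PORT B =====
def columnasConsecutivasAscendentes_alt (posiciones : List (String × Int)) : Bool :=
  let cols := posiciones.map Prod.snd
  match cols with
  | [] => true
  | c0 :: _ => decide (cols = (List.range cols.length).map (fun (k : Nat) => c0 + (k : Int)))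

-- ===== PRECONDITION & SPEC =====
def Spec_columnasConsecutivasAscendentes (posiciones : List (String × Int)) (out : Bool) : Prop := out = columnasConsecutivasAscendentes_alt posiciones
instance (posiciones : List (String × Int)) (out : Bool) : Decidable (Spec_columnasConsecutivasAscendentes posiciones out) := by unfold Spec_columnasConsecutivasAscendentes; infer_instance

-- ===== CLAIM (what is proved, stated in full; the proofs are below) =====
def Claim_equal_columnasConsecutivasAscendentes : Prop := ∀ (posiciones : List (String × Int)), Dom_columnasConsecutivasAscendentes posiciones → Spec_columnasConsecutivasAscendentes posiciones (columnasConsecutivasAscendentes posiciones)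

-- ===== LEMMAS AND PROOFS =====

-- The loop ends at the list's length iff every later column is the start column shifted by its distance.
theorem ccaLoop_eq_len_iff (posiciones : List (String × Int)) :
    ∀ (d i : Nat) (col : Int), posiciones.length - i = d → i ≤ posiciones.length →
    (ccaLoop posiciones i col = posiciones.length ↔
      ∀ m, i ≤ m → m < posiciones.length →
        (posiciones.getD m ("", 0)).2 = col + ((m - i : Nat) : Int) + 1) := by
  intro d
  induction d with
  | zero =>
    intro i col hd hi
    have hie : i = posiciones.length := by omega
    rw [ccaLoop]
    simp only [numeroDePosicion]
    rw [dif_neg (by omega)]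
    constructor
    · intro _ m hm1 hm2; omega
    · intro _; omega
  | succ d ih =>
    intro i col hd hi
    have hlt : i < posiciones.length := by omega
    rw [ccaLoop]
    simp only [numeroDePosicion]
    by_cases hc : (posiciones.getD i ("", 0)).2 = col + 1
    · rw [dif_pos ⟨hlt, hc⟩]
      rw [ih (i + 1) (col + 1) (by omega) (by omega)]
      constructor
      · intro h m hm1 hm2
        rcases Nat.eq_or_lt_of_le hm1 with he | hlt2
        · subst he; simpa using hc
        · have := h m (by omega) hm2
          have hcast : ((m - i : Nat) : Int) = ((m - (i + 1) : Nat) : Int) + 1 := by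
            omega
          rw [hcast]; linarith [this]
      · intro h m hm1 hm2
        have := h m (by omega) hm2
        have hcast : ((m - i : Nat) : Int) = ((m - (i + 1) : Nat) : Int) + 1 := by
          omega
        rw [hcast] at this; linarith [this]
    · rw [dif_neg (by intro h; exact hc h.2)]
      constructor
      · intro h; omega
      · intro h
        exfalso
        have := h i (le_refl _) hlt
        simp at this
        exact hc this


-- B's list equation is pointwise consecutiveness.
theorem range_map_iff (cols : List Int) (c0 : Int) (n : Nat) (hn : cols.length = n) :
    (cols = (List.range n).map (fun (k : Nat) => c0 + (k : Int))) ↔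
    ∀ k, k < n → cols.getD k 0 = c0 + (k : Int) := by
  constructor
  · intro h k hk
    rw [h]
    simp [List.getD, hk]
  · intro h
    apply List.ext_getElem
    · simp [hn]
    · intro i h1 h2
      rw [← List.getD_eq_getElem cols 0 h1]
      simp only [List.getElem_map, List.getElem_range]
      exact h i (by omega)

theorem cols_getD (posiciones : List (String × Int)) (k : Nat) (h : k < posiciones.length) :
    (posiciones.map Prod.snd).getD k 0 = (posiciones.getD k ("", 0)).2 := by
  simp [List.getD, h]

-- ===== VERDICT (by name: the statement is the Claim_ definition above) =====
theorem columnasConsecutivasAscendentes_spec : Claim_equal_columnasConsecutivasAscendentes := by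
  intro posiciones _
  unfold Spec_columnasConsecutivasAscendentes
  unfold columnasConsecutivasAscendentes columnasConsecutivasAscendentes_alt
  cases posiciones with
  | nil => simp
  | cons p ps =>
    simp only [List.length_cons, List.map_cons, numeroDePosicion]
    rw [if_neg (by omega)]
    have hloop := ccaLoop_eq_len_iff (p :: ps) (ps.length) 1 p.2 (by simp) (by simp)
    simp only [List.length_cons] at hloop
    have hrange := range_map_iff (p.2 :: ps.map Prod.snd) p.2 (ps.length + 1) (by simp)
    have key : (ccaLoop (p :: ps) 1 p.2 = ps.length + 1) ↔
        ((p.2 :: ps.map Prod.snd) = (List.range (ps.length + 1)).map (fun (k : Nat) => p.2 + (k : Int))) := by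
      rw [hloop, hrange]
      constructor
      · intro h k hk
        cases k with
        | zero => simp
        | succ m =>
          have hm : m + 1 < (p :: ps).length := by simp; omega
          have h1 := h (m + 1) (by omega) (by simpa using hm)
          have hget := cols_getD (p :: ps) (m + 1) hm
          simp only [List.map_cons] at hget
          rw [hget, h1]
          have hc : ((m + 1 - 1 : Nat) : Int) = (m : Int) := by omega
          rw [hc]
          push_cast
          ring
      · intro h m hm1 hm2
        have hm2' : m < (p :: ps).length := hm2
        have h1 := h m (by simpa using hm2)
        have hget := cols_getD (p :: ps) m hm2'
        simp only [List.map_cons] at hget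
        rw [hget] at h1
        rw [h1]
        have hc : ((m - 1 : Nat) : Int) = (m : Int) - 1 := by omega
        rw [hc]; ring
    simp only [List.length_map] at key ⊢
    rw [decide_eq_decide]
    exact key
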